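-- pv_equiv track=rewrite | github.com/nispa/nispa-whisper | backend/transcribe/export.py | generate_txt
-- ===== SOURCE A (Python) =====
-- def generate_txt(segments, speaker_labels=True):
--     """Genera un file di testo semplice"""
--     lines = []
--     current_speaker = None
--
--     for seg in segments:
--         speaker = seg.get('speaker', 'Speaker 1')
--         text = seg['text'].strip()
--
--         if speaker_labels and speaker != current_speaker:
--             lines.append(f"\n[{speaker}]:")
--             current_speaker = speaker
--
--         lines.append(text)
--
--     return "\n".join(lines).strip()
-- ===== SOURCE B (Python) =====
-- def generate_txt(segments, speaker_labels=True):
--     """Genera un file di testo semplice"""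
--     lines = []
--     i, n = 0, len(segments)
--     while i < n:
--         speaker = segments[i].get('speaker', 'Speaker 1')
--         j = i + 1
--         while j < n and segments[j].get('speaker', 'Speaker 1') == speaker:
--             j += 1
--         if speaker_labels:
--             lines.append("\n[%s]:" % speaker)
--         for seg in segments[i:j]:
--             lines.append(seg['text'].strip())
--         i = j
--     return "\n".join(lines).strip()
-- ===== Notes on version B (the rewrite author's own statement) =====
-- stated objective: alternative
-- what changed: Replaces the mutable current_speaker sentinel with an explicit two-level traversal that scans each run of consecutive same-speaker segments and emits the label once per run.
import Mathlib
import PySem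

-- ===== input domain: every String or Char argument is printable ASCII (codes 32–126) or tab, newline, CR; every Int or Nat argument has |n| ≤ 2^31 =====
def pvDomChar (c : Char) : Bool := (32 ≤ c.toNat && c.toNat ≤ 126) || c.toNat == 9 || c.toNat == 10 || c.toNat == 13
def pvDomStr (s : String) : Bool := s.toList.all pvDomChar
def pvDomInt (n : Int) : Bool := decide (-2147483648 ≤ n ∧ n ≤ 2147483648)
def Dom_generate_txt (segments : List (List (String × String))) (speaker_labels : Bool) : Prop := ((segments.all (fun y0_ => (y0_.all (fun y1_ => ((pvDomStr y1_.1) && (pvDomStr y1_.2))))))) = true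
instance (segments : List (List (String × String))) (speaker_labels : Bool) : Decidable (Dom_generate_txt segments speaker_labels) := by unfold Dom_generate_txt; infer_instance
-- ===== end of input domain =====

-- B replaces A's mutable current_speaker sentinel by an explicit scan over runs of
-- consecutive same-speaker segments (objective: alternative decomposition, same cost).
-- first-match association-list lookup = seg.get(k) on the dict
def segGet? (seg : List (String × String)) (k : String) : Option String :=
  PySem.Dict.get? (PySem.Dict.mk seg) k

-- ===== PORT A =====
-- the body of A's for-loop: state = (lines, current_speaker)
def stepA (speaker_labels : Bool) (st : List String × Option String)
    (seg : List (String × String)) : List String × Option String :=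
  let speaker := (segGet? seg "speaker").getD "Speaker 1"
  let text := PySem.Str.strip ((segGet? seg "text").getD "")  -- Pre_ guarantees "text" present
  let st1 := if speaker_labels && !(some speaker == st.2)
    then (st.1 ++ ["\n[" ++ speaker ++ "]:"], some speaker) else st
  (st1.1 ++ [text], st1.2)

def generate_txt (segments : List (List (String × String))) (speaker_labels : Bool) : String :=
  PySem.Str.strip (PySem.Str.join "\n" ((segments.foldl (stepA speaker_labels) ([], none)).1))

-- ===== PORT B =====
def spkOf (seg : List (String × String)) : String :=
  (segGet? seg "speaker").getD "Speaker 1"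

def textOf (seg : List (String × String)) : String :=
  PySem.Str.strip ((segGet? seg "text").getD "")  -- Pre_ guarantees "text" present

-- outer while: peel one run of consecutive same-speaker segments per iteration
def altLines : List (List (String × String)) → Bool → List String
  | [], _ => []
  | seg :: rest, labels =>
    let spk := spkOf seg
    let run := rest.takeWhile (fun s => spkOf s == spk)
    let rest' := rest.dropWhile (fun s => spkOf s == spk)
    (if labels then ["\n[" ++ spk ++ "]:"] else []) ++ (seg :: run).map textOf
      ++ altLines rest' labels
termination_by segs _ => segs.length
decreasing_by simpa using Nat.lt_succ_of_le (List.length_dropWhile_le _ _)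

def generate_txt_alt (segments : List (List (String × String))) (speaker_labels : Bool) : String :=
  PySem.Str.strip (PySem.Str.join "\n" (altLines segments speaker_labels))

-- ===== PRECONDITION & SPEC =====
-- Pre_ excludes segments without a "text" key, where Python A raises KeyError.
def Pre_generate_txt (segments : List (List (String × String))) (speaker_labels : Bool) : Prop :=
  segments.all (fun seg => seg.any (fun p => p.1 == "text")) = true
instance (segments : List (List (String × String))) (speaker_labels : Bool) : Decidable (Pre_generate_txt segments speaker_labels) := by unfold Pre_generate_txt; infer_instance

def pvWitness_generate_txt : (List (List (String × String))) × Bool :=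
  ([[("text", " hello ")], [("speaker", "Bob"), ("text", "hi")], [("speaker", "Bob"), ("text", "again")]], true)

def Spec_generate_txt (segments : List (List (String × String))) (speaker_labels : Bool) (out : String) : Prop := out = generate_txt_alt segments speaker_labels
instance (segments : List (List (String × String))) (speaker_labels : Bool) (out : String) : Decidable (Spec_generate_txt segments speaker_labels out) := by unfold Spec_generate_txt; infer_instance

-- ===== CLAIM (what is proved, stated in full; the proofs are below) =====
def Claim_equal_generate_txt : Prop := ∀ (segments : List (List (String × String))) (speaker_labels : Bool), Dom_generate_txt segments speaker_labels → Pre_generate_txt segments speaker_labels → Spec_generate_txt segments speaker_labels (generate_txt segments speaker_labels)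

-- ===== LEMMAS AND PROOFS =====

-- within a run (labels on, current speaker already spk) A only appends texts
lemma foldA_run_true (spk : String) (segs : List (List (String × String)))
    (h : ∀ s ∈ segs, spkOf s = spk) (acc : List String) :
    segs.foldl (stepA true) (acc, some spk) = (acc ++ segs.map textOf, some spk) := by
  induction segs generalizing acc with
  | nil => simp
  | cons s rest ih =>
    have hs : spkOf s = spk := h s (by simp)
    simp only [List.foldl_cons, stepA, List.map_cons]
    rw [show (segGet? s "speaker").getD "Speaker 1" = spk from hs]
    simp only [BEq.rfl, Bool.not_true, Bool.and_false, Bool.false_eq_true, if_false]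
    rw [ih (fun t ht => h t (by simp [ht]))]
    simp [textOf]

-- with labels off A only appends texts and never touches current_speaker
lemma foldA_run_false (segs : List (List (String × String)))
    (acc : List String) (cur : Option String) :
    segs.foldl (stepA false) (acc, cur) = (acc ++ segs.map textOf, cur) := by
  induction segs generalizing acc with
  | nil => simp
  | cons s rest ih =>
    simp only [List.foldl_cons, stepA, Bool.false_and, Bool.false_eq_true, if_false, List.map_cons]
    rw [ih]
    simp [textOf]

-- labels off: B's grouped lines are just all the texts
lemma altLines_false (segs : List (List (String × String))) :
    altLines segs false = segs.map textOf := by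
  induction hn : segs.length using Nat.strong_induction_on generalizing segs with
  | _ n ih =>
    match segs, hn with
    | [], _ => simp [altLines]
    | seg :: rest, hn =>
      rw [altLines]
      simp only [Bool.false_eq_true, if_false, List.nil_append]
      rw [ih (rest.dropWhile (fun s => spkOf s == spkOf seg)).length
          (by simpa [← hn] using Nat.lt_succ_of_le (List.length_dropWhile_le _ _)) _ rfl]
      rw [← List.map_append]
      rw [List.cons_append, List.takeWhile_append_dropWhile]

-- labels on: A's fold equals B's grouped lines whenever the incoming current_speaker
-- differs from the first segment's speaker
lemma foldA_eq_altLines_true (segs : List (List (String × String)))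
    (cur : Option String) (acc : List String)
    (h : ∀ s ∈ segs.head?, cur ≠ some (spkOf s)) :
    (segs.foldl (stepA true) (acc, cur)).1 = acc ++ altLines segs true := by
  induction hn : segs.length using Nat.strong_induction_on generalizing segs cur acc with
  | _ n ih =>
    match segs, hn with
    | [], _ => simp [altLines]
    | seg :: rest, hn =>
      have hne : cur ≠ some (spkOf seg) := h seg (by simp)
      rw [altLines]
      simp only [List.foldl_cons, stepA]
      have hbeq : (some (spkOf seg) == cur) = false := by
        cases hc : some (spkOf seg) == cur with
        | false => rfl
        | true => exact absurd (eq_of_beq hc).symm hne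
      rw [show (segGet? seg "speaker").getD "Speaker 1" = spkOf seg from rfl, hbeq]
      simp only [Bool.not_false, Bool.and_true, if_true]
      rw [← List.takeWhile_append_dropWhile (p := fun s => spkOf s == spkOf seg) (l := rest),
        List.foldl_append]
      rw [foldA_run_true (spkOf seg) _
        (fun t ht => by simpa using (List.mem_takeWhile_imp ht)) _]
      rw [ih (rest.dropWhile (fun s => spkOf s == spkOf seg)).length
          (by simpa [← hn] using Nat.lt_succ_of_le (List.length_dropWhile_le _ _)) _ _ _
          ?_ rfl]
      · simp [textOf]
      · intro s hs
        cases hd : rest.dropWhile (fun s => spkOf s == spkOf seg) with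
        | nil => simp [hd] at hs
        | cons a tl =>
          rw [hd] at hs
          simp only [List.head?_cons, Option.mem_def, Option.some.injEq] at hs
          subst hs
          have := List.head?_dropWhile_not (fun s => spkOf s == spkOf seg) rest
          rw [hd] at this
          simp only [List.head?_cons, beq_eq_false_iff_ne] at this
          intro hc
          exact this (by injection hc with hc'; exact hc'.symm)

-- ===== VERDICT (by name: the statement is the Claim_ definition above) =====
theorem generate_txt_spec : Claim_equal_generate_txt := by
  intro segments speaker_labels _ _
  unfold Spec_generate_txt generate_txt generate_txt_alt
  cases speaker_labels with
  | false =>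
    rw [foldA_run_false, altLines_false]
    rfl
  | true =>
    rw [foldA_eq_altLines_true segments none [] (by simp)]
    rfl
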